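-- pv_equiv track=rewrite | github.com/btackett3/ModalConsistencyChecker | weblogic.py | changeC
-- ===== SOURCE A (Python) =====
-- def changeC(string):
--
--     index = 0
--     while index < len(string):
--         if string[index] == 'C':
--             string = string[:index] + "AN" + string[index+1:]
--             index = 0
--         else:
--             index = index + 1
--     return string
-- ===== SOURCE B (Python) =====
-- def changeC(string):
--     out = []
--     for ch in string:
--         if ch == 'C':
--             out.append('A')
--             out.append('N')
--         else:
--             out.append(ch)
--     return ''.join(out)
-- ===== Notes on version B (the rewrite author's own statement) =====
-- stated objective: simpler
-- what changed: A single left-to-right pass appends the replacement pair (or the character itself) to an accumulator list joined once at the end, instead of A's repeated string splicing that rescans from the start after every replacement.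
import Mathlib
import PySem

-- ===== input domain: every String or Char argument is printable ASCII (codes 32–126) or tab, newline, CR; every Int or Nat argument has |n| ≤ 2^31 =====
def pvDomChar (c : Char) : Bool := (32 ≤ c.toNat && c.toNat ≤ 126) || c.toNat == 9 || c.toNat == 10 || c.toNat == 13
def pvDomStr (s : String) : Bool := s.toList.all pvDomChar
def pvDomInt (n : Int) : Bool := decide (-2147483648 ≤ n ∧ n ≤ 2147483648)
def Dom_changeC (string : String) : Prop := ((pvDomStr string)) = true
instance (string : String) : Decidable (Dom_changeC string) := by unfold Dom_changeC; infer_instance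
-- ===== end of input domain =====

-- B replaces A's splice-and-rescan-from-0 loop by one linear pass; same return value.

-- ===== PORT A =====
-- A's while loop: on a 'C' at position i, splice in "AN" and restart at index 0;
-- otherwise advance. Terminates because each splice removes one 'C' and each
-- advance shrinks the remaining suffix.
def changeCAux (s : List Char) (i : Nat) : List Char :=
  if h : i < s.length then
    if hC : s[i] = 'C' then
      changeCAux (s.take i ++ ['A', 'N'] ++ s.drop (i + 1)) 0
    else
      changeCAux s (i + 1)
  else s
termination_by (s.count 'C', s.length - i)
decreasing_by
  · left
    have hsplit : s = s.take i ++ s[i] :: s.drop (i + 1) := by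
      conv_lhs => rw [← List.take_append_drop i s]
      rw [List.drop_eq_getElem_cons h]
    have h1 : s.count 'C' = (s.take i).count 'C' + 1 + (s.drop (i + 1)).count 'C' := by
      conv_lhs => rw [hsplit]
      simp [List.count_append, List.count_cons, hC]
      omega
    have h2 : (s.take i ++ ['A', 'N'] ++ s.drop (i + 1)).count 'C'
        = (s.take i).count 'C' + (s.drop (i + 1)).count 'C' := by
      simp [List.count_append]
    rw [h2, h1]
    omega
  · right
    omega

def changeC (string : String) : String :=
  String.mk (changeCAux string.toList 0)

-- ===== PORT B =====
-- single pass: append 'A','N' for a 'C', the character itself otherwise, then join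
def changeC_alt (string : String) : String :=
  String.mk (string.toList.foldl
    (fun out ch => if ch = 'C' then out ++ ['A'] ++ ['N'] else out ++ [ch]) [])

-- ===== PRECONDITION & SPEC =====
def Spec_changeC (string : String) (out : String) : Prop := out = changeC_alt string
instance (string : String) (out : String) : Decidable (Spec_changeC string out) := by unfold Spec_changeC; infer_instance

-- ===== CLAIM (what is proved, stated in full; the proofs are below) =====
def Claim_equal_changeC : Prop := ∀ (string : String), Dom_changeC string → Spec_changeC string (changeC string)

-- ===== LEMMAS AND PROOFS =====

def pvExpand (c : Char) : List Char := if c = 'C' then ['A', 'N'] else [c]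

theorem flatMap_expand_of_noC (l : List Char) (h : ∀ c ∈ l, c ≠ 'C') :
    l.flatMap pvExpand = l := by
  induction l with
  | nil => rfl
  | cons x xs ih =>
    have hx : x ≠ 'C' := h x (by simp)
    simp [List.flatMap_cons, pvExpand, hx, ih (fun c hc => h c (by simp [hc]))]

theorem changeCAux_eq (s : List Char) (i : Nat)
    (hpre : ∀ c ∈ s.take i, c ≠ 'C') :
    changeCAux s i = s.take i ++ (s.drop i).flatMap pvExpand := by
  fun_induction changeCAux s i with
  | case1 s i h hc ih =>
    -- s[i] = 'C': splice and restart at 0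
    have hsplit : s.drop i = s[i] :: s.drop (i + 1) := List.drop_eq_getElem_cons h
    have hnoC : ∀ c ∈ (s.take i ++ ['A', 'N'] ++ s.drop (i + 1)).take 0, c ≠ 'C' := by simp
    rw [ih hnoC]
    simp only [List.take_zero, List.drop_zero, List.nil_append, List.flatMap_append]
    rw [flatMap_expand_of_noC _ hpre, hsplit]
    simp [pvExpand, hc, List.flatMap_cons]
  | case2 s i h hc ih =>
    -- s[i] ≠ 'C': advance
    have hpre' : ∀ c ∈ s.take (i + 1), c ≠ 'C' := by
      intro c hcmem
      rw [List.take_succ] at hcmem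
      rcases List.mem_append.mp hcmem with h1 | h2
      · exact hpre c h1
      · simp [List.getElem?_eq_getElem h] at h2
        simpa [h2] using hc
    have htake : s.take (i + 1) = s.take i ++ [s[i]] := by
      rw [List.take_succ, List.getElem?_eq_getElem h]; rfl
    have hexp : pvExpand s[i] = [s[i]] := by simp [pvExpand, hc]
    rw [ih hpre', htake, List.append_assoc]
    conv_rhs => rw [List.drop_eq_getElem_cons h, List.flatMap_cons, hexp]
  | case3 s i h =>
    have : s.length ≤ i := by omega
    simp [List.take_of_length_le this, List.drop_of_length_le this]

theorem changeC_spec' (string : String) :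
    changeC string = changeC_alt string := by
  unfold changeC changeC_alt
  rw [changeCAux_eq string.toList 0 (by simp)]
  have : ∀ (l acc : List Char),
      l.foldl (fun out ch => if ch = 'C' then out ++ ['A'] ++ ['N'] else out ++ [ch]) acc
        = acc ++ l.flatMap pvExpand := by
    intro l acc
    have hf : (fun (out : List Char) ch => if ch = 'C' then out ++ ['A'] ++ ['N'] else out ++ [ch])
        = fun out ch => out ++ pvExpand ch := by
      funext out ch
      by_cases h : ch = 'C' <;> simp [pvExpand, h]
    rw [hf, PySem.List.foldl_append_eq_flatMap]
  rw [this]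
  simp

-- ===== VERDICT (by name: the statement is the Claim_ definition above) =====
theorem changeC_spec : Claim_equal_changeC := by
  intro string _
  exact changeC_spec' string
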